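-- pv_equiv track=rewrite | github.com/J-Jaeh/algorithm | 백준/Silver/16564. 히오스 프로게이머/히오스 프로게이머.py | hos
-- ===== SOURCE A (Python) =====
-- def hos(arr,k):
--     # min_level = sum(arr)
--     # max_level = arr + k
--     # # 이렇게 하면 범위를 정할 수 있고
--     # 범위를 정해서 만들 수 있는 k 값을 구하는건가?
--     # 만약에 중앙값을 만들 수 있냐 ? 부족하다 or 넘친다
--     # 넘치면 더 올려야하고 부족하면 더 내려야하고
--     #예상할때
--     # low=1
--     # high=k
--
--     # while min_level<=max_level:
--     #     mid=(min_level+max_level)//2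
--     #     tem_max=cal_max()
--     return_value = 0
--     search_index=1
--     for i in range(len(arr)):
--         #끝까지 갈경우...
--         if i==(len(arr)-1):
--             temp=k//search_index
--             return arr[i]+temp
--
--         if (arr[i+1]-arr[i])*(i+1)<=k:
--            k-=(arr[i+1]-arr[i])*(i+1)
--            search_index +=1
--         else:
--             temp=k//search_index
--             return arr[i]+temp
-- ===== SOURCE B (Python) =====
-- def hos(arr, k):
--     # Declarative reformulation: cost[t] = t*arr[t] - sum(arr[:t]) is the absolute cost of
--     # raising the first t elements up to arr[t]; answer = last index whose cost fits in k.
--     n = len(arr)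
--     P = [0]
--     for x in arr:
--         P.append(P[-1] + x)
--     cost = [t * arr[t] - P[t] for t in range(n)]
--     j = next((t for t in range(1, n) if cost[t] > k), n) - 1
--     return arr[j] + (k - cost[j]) // (j + 1)
-- ===== Notes on version B (the rewrite author's own statement) =====
-- stated objective: alternative
-- what changed: Replaces A's stateful incremental sweep (mutating k and search_index while walking consecutive differences) with a declarative pipeline: a prefix-sum table, an absolute-cost table cost[t] = t*arr[t] - prefix[t], a first-index-exceeding-budget search, and one closed-form final formula.
-- outside the precondition, e.g. on hos([], 0): A returns None, B raises IndexError
import Mathlib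
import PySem

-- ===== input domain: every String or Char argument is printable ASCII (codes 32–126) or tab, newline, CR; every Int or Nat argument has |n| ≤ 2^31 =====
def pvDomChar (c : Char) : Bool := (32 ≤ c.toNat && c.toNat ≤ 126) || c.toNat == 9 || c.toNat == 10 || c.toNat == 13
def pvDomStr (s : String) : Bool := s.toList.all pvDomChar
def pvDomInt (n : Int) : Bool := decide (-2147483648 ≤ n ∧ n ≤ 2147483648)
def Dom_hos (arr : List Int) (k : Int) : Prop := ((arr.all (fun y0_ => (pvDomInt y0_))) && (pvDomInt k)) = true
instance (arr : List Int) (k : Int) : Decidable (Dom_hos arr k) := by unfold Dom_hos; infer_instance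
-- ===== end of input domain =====

-- B replaces A's stateful incremental sweep with an absolute-cost table + first-index search;
-- equivalence is over non-empty arrays (on [] A returns None, B raises IndexError).
-- ===== PORT A =====
-- A's for-loop with early returns: recursion over the remaining suffix,
-- carrying current element, remaining k and search_index.
def hosLoop (a : Int) (rest : List Int) (k : Int) (si : Int) : Int :=
  match rest with
  | [] => a + PySem.Int.floordiv k si               -- i == len(arr)-1 branch
  | b :: rs =>
      if (b - a) * si ≤ k then hosLoop b rs (k - (b - a) * si) (si + 1)
      else a + PySem.Int.floordiv k si

def hos (arr : List Int) (k : Int) : Int :=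
  match arr with
  | [] => 0            -- Python falls off the loop and returns None here; excluded by Pre_
  | a :: rest => hosLoop a rest k 1

-- ===== PORT B =====
-- P = [0]; for x in arr: P.append(P[-1] + x)   (prefix sums, built front to back)
def hosPrefix (acc : Int) (l : List Int) : List Int :=
  match l with
  | [] => [acc]
  | x :: t => acc :: hosPrefix (acc + x) t

-- cost = [t * arr[t] - P[t] for t in range(n)]
def hosCosts (arr : List Int) : List Int :=
  (PySem.List.pyRange 0 (arr.length : Int) 1).map
    (fun t => t * PySem.List.pyGetD arr t 0 - PySem.List.pyGetD (hosPrefix 0 arr) t 0)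

def hos_alt (arr : List Int) (k : Int) : Int :=
  let n : Int := (arr.length : Int)
  let cost := hosCosts arr
  -- j = next((t for t in range(1, n) if cost[t] > k), n) - 1
  let j : Int :=
    (((PySem.List.pyRange 1 n 1).find?
        (fun t => decide (k < PySem.List.pyGetD cost t 0))).getD n) - 1
  -- arr[j] + (k - cost[j]) // (j + 1)   (arr[j]/cost[j] are in range for arr ≠ []; on [] Python raises)
  PySem.List.pyGetD arr j 0 + PySem.Int.floordiv (k - PySem.List.pyGetD cost j 0) (j + 1)

-- ===== PRECONDITION & SPEC =====
-- Pre_ excludes only the empty list: there A falls off its loop and returns None (not an int)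
-- and B's arr[-1] raises IndexError.
def Pre_hos (arr : List Int) (k : Int) : Prop := arr ≠ []
instance (arr : List Int) (k : Int) : Decidable (Pre_hos arr k) := by unfold Pre_hos; infer_instance

def pvWitness_hos : List Int × Int := ([1, 2, 4], 5)

def Spec_hos (arr : List Int) (k : Int) (out : Int) : Prop := out = hos_alt arr k
instance (arr : List Int) (k : Int) (out : Int) : Decidable (Spec_hos arr k out) := by unfold Spec_hos; infer_instance

-- ===== CLAIM (what is proved, stated in full; the proofs are below) =====
def Claim_equal_hos : Prop := ∀ (arr : List Int) (k : Int), Dom_hos arr k → Pre_hos arr k → Spec_hos arr k (hos arr k)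

-- ===== LEMMAS AND PROOFS =====

lemma hosArr_at (pre post : List Int) (a : Int) :
    PySem.List.pyGetD (pre ++ a :: post) ((pre.length : Nat) : Int) 0 = a := by
  rw [PySem.List.pyGetD_natCast]
  simp [List.getD_eq_getElem?_getD]

lemma hosPrefix_getD : ∀ (pre rest : List Int) (c : Int),
    (hosPrefix c (pre ++ rest)).getD pre.length 0 = c + pre.sum := by
  intro pre
  induction pre with
  | nil =>
      intro rest c
      cases rest <;> simp [hosPrefix]
  | cons x t ih =>
      intro rest c
      simp only [List.cons_append, hosPrefix, List.length_cons, List.getD_cons_succ, ih,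
        List.sum_cons]
      ring

-- the cost-table entry at index pre.length of pre ++ a :: post
lemma hosCosts_at (pre post : List Int) (a : Int) :
    PySem.List.pyGetD (hosCosts (pre ++ a :: post)) ((pre.length : Nat) : Int) 0
      = (pre.length : Int) * a - pre.sum := by
  have hlen : pre.length < (pre ++ a :: post).length := by simp
  unfold hosCosts
  rw [PySem.List.pyGetD_map_pyRange _ _ _ _ hlen]
  rw [hosArr_at pre post a, PySem.List.pyGetD_natCast, hosPrefix_getD pre (a :: post) 0]
  ring

-- main invariant: A's loop state at index i = pre.length (current element a, remaining
-- budget k0 - cost(i), search_index i+1) produces B's table-search result from t = i+1 on.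
lemma hosLoop_eq_find : ∀ (rest pre : List Int) (a k0 : Int),
    hosLoop a rest (k0 - ((pre.length : Int) * a - pre.sum)) ((pre.length : Int) + 1)
      = (let arr := pre ++ a :: rest
         let j : Int :=
           (((PySem.List.pyRange ((pre.length : Int) + 1) (arr.length : Int) 1).find?
               (fun t => decide (k0 < PySem.List.pyGetD (hosCosts arr) t 0))).getD
             (arr.length : Int)) - 1
         PySem.List.pyGetD arr j 0 +
           PySem.Int.floordiv (k0 - PySem.List.pyGetD (hosCosts arr) j 0) (j + 1)) := by
  intro rest
  induction rest with
  | nil =>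
      intro pre a k0
      simp only []
      have hn : ((pre ++ [a]).length : Int) = (pre.length : Int) + 1 := by simp
      rw [hn, PySem.List.pyRange_one_eq_nil (le_refl _)]
      simp only [List.find?_nil, Option.getD_none, add_sub_cancel_right]
      rw [hosArr_at pre [] a, hosCosts_at pre [] a]
      simp [hosLoop]
  | cons b rs ih =>
      intro pre a k0
      simp only []
      have harr : pre ++ a :: b :: rs = (pre ++ [a]) ++ b :: rs := by simp
      have hn : ((pre.length : Int) + 1) < ((pre ++ a :: b :: rs).length : Int) := by
        simp
      rw [PySem.List.pyRange_one_cons hn, List.find?_cons]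
      have hcost : PySem.List.pyGetD (hosCosts (pre ++ a :: b :: rs)) ((pre.length : Int) + 1) 0
          = ((pre.length : Int) + 1) * b - (pre.sum + a) := by
        have := hosCosts_at (pre ++ [a]) rs b
        rw [harr]
        simpa using this
      by_cases hc : (b - a) * ((pre.length : Int) + 1) ≤ k0 - ((pre.length : Int) * a - pre.sum)
      · -- A continues; B's predicate is false at t = pre.length + 1
        have hpred : (k0 < PySem.List.pyGetD (hosCosts (pre ++ a :: b :: rs)) ((pre.length : Int) + 1) 0) = False := by
          rw [hcost]
          simp only [eq_iff_iff, iff_false, not_lt]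
          nlinarith [hc]
        rw [hosLoop]
        simp only [hc, if_true, hpred, decide_false]
        have hk' : k0 - ((pre.length : Int) * a - pre.sum) - (b - a) * ((pre.length : Int) + 1)
            = k0 - ((((pre ++ [a]).length : Int)) * b - (pre ++ [a]).sum) := by
          simp; ring
        have hsi : (pre.length : Int) + 1 + 1 = ((pre ++ [a]).length : Int) + 1 := by simp
        rw [hk', hsi]
        have := ih (pre ++ [a]) b k0
        simp only [] at this
        rw [this, ← harr]
      · -- A returns here; B's predicate is true at t = pre.length + 1, so j = pre.length
        have hpred : (k0 < PySem.List.pyGetD (hosCosts (pre ++ a :: b :: rs)) ((pre.length : Int) + 1) 0) = True := by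
          rw [hcost]
          simp only [eq_iff_iff, iff_true]
          nlinarith [lt_of_not_ge hc]
        rw [hosLoop]
        simp only [hc, if_false, hpred, decide_true, Option.getD_some, add_sub_cancel_right]
        rw [hosArr_at pre (b :: rs) a, hosCosts_at pre (b :: rs) a]

-- ===== VERDICT (by name: the statement is the Claim_ definition above) =====
theorem hos_spec : Claim_equal_hos := by
  intro arr k _ hpre
  unfold Spec_hos
  match arr, hpre with
  | a :: rest, _ =>
    have h := hosLoop_eq_find rest [] a k
    simp only [List.nil_append, List.length_nil, Nat.cast_zero, zero_mul, zero_add,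
      List.sum_nil, sub_zero] at h
    unfold hos hos_alt
    simpa using h
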